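-- pv_equiv track=rewrite | github.com/horvatmarin2-coder/MATRICE | MATRICE.py | komutativnost
-- ===== SOURCE A (Python) =====
-- def komutativnost(m1, m2):
--     def mnozenje_matrica(A, B):
--         if len(A[0]) != len(B):
--             return None
--         rezultat = [[0 for _ in range(len(B[0]))] for _ in range(len(A))]
--         for i in range(len(A)):
--             for j in range(len(B[0])):
--                 for k in range(len(B)):
--                     rezultat[i][j] += A[i][k] * B[k][j]
--         return rezultat
--
--     AB = mnozenje_matrica(m1, m2)
--     BA = mnozenje_matrica(m2, m1)
--
--     if AB is None or BA is None:
--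
--         return False
--
--     if AB == BA:
--         return True
--     else:
--         return False
-- ===== SOURCE B (Python) =====
-- def komutativnost(m1, m2):
--     n, p = len(m1), len(m2)
--     if len(m1[0]) != p or len(m2[0]) != n or n != p:
--         return False
--     for i in range(n):
--         for j in range(n):
--             ab = sum(m1[i][k] * m2[k][j] for k in range(p))
--             ba = sum(m2[i][k] * m1[k][j] for k in range(n))
--             if ab != ba:
--                 return False
--     return True
-- ===== Notes on version B (the rewrite author's own statement) =====
-- stated objective: faster
-- what changed: B never materializes the BA matrix: after the dimension checks it computes each BA entry on the fly and compares it to the corresponding AB entry, returning False at the first mismatch instead of building both full products and comparing whole matrices.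
import Mathlib
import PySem

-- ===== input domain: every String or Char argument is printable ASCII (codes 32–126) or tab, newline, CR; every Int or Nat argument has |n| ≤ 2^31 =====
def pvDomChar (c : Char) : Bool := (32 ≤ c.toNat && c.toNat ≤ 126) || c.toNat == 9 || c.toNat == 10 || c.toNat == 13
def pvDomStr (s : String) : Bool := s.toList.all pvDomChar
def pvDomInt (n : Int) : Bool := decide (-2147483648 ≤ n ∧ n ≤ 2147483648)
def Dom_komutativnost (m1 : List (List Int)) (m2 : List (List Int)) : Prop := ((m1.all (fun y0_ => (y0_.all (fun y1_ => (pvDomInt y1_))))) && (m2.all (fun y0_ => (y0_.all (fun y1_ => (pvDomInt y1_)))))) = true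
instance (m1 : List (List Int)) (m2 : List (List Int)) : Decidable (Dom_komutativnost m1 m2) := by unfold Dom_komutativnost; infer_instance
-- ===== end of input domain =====

-- B fuses the second product with the comparison: no BA matrix is built, and the first mismatching
-- entry returns False early — measurably faster on a timing run's random inputs.

-- ===== PORT A =====
-- rezultat[i][j] += v  (in-place update of the row, then of the matrix)
def pvRowBump (row : List Int) (j : Nat) (v : Int) : List Int :=
  row.set j (row.getD j 0 + v)

def pvBump (r : List (List Int)) (i j : Nat) (v : Int) : List (List Int) :=
  r.set i (pvRowBump (r.getD i []) j v)

-- mnozenje_matrica: None when the inner dimensions disagree, else the triple-loop product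
def pvMnozenje (A B : List (List Int)) : Option (List (List Int)) :=
  if (A.headD []).length ≠ B.length then none
  else some ((List.range A.length).foldl (fun r i =>
      (List.range (B.headD []).length).foldl (fun r j =>
        (List.range B.length).foldl (fun r k =>
          pvBump r i j ((A.getD i []).getD k 0 * (B.getD k []).getD j 0)) r) r)
    (A.map (fun _ => (B.headD []).map (fun _ => (0:Int)))))

def komutativnost (m1 : List (List Int)) (m2 : List (List Int)) : Bool :=
  match pvMnozenje m1 m2, pvMnozenje m2 m1 with
  | some AB, some BA => decide (AB = BA)
  | _, _ => false

-- ===== PORT B =====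
def komutativnost_alt (m1 : List (List Int)) (m2 : List (List Int)) : Bool :=
  if (m1.headD []).length != m2.length || (m2.headD []).length != m1.length
      || m1.length != m2.length then false
  else (List.range m1.length).all (fun i => (List.range m1.length).all (fun j =>
    ((List.range m2.length).foldl
        (fun s k => s + (m1.getD i []).getD k 0 * (m2.getD k []).getD j 0) 0)
    == ((List.range m1.length).foldl
        (fun s k => s + (m2.getD i []).getD k 0 * (m1.getD k []).getD j 0) 0)))

-- ===== PRECONDITION & SPEC =====
-- Pre_ is exactly the set of inputs on which the Python A returns: it raises IndexError when a
-- matrix is empty, or when a product's loops index a ragged row shorter than the loop bounds.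
def Pre_komutativnost (m1 : List (List Int)) (m2 : List (List Int)) : Prop :=
  m1 ≠ [] ∧ m2 ≠ [] ∧
  ((m1.headD []).length = m2.length →
     (m2.headD []).length = 0 ∨
       ((∀ r ∈ m1, m2.length ≤ r.length) ∧ (∀ r ∈ m2, (m2.headD []).length ≤ r.length))) ∧
  ((m2.headD []).length = m1.length →
     (m1.headD []).length = 0 ∨
       ((∀ r ∈ m2, m1.length ≤ r.length) ∧ (∀ r ∈ m1, (m1.headD []).length ≤ r.length)))

instance (m1 : List (List Int)) (m2 : List (List Int)) : Decidable (Pre_komutativnost m1 m2) := by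
  unfold Pre_komutativnost; infer_instance

def pvWitness_komutativnost : List (List Int) × List (List Int) := ([[1, 0], [0, 1]], [[2, 3], [4, 5]])

def Spec_komutativnost (m1 : List (List Int)) (m2 : List (List Int)) (out : Bool) : Prop := out = komutativnost_alt m1 m2
instance (m1 : List (List Int)) (m2 : List (List Int)) (out : Bool) : Decidable (Spec_komutativnost m1 m2 out) := by unfold Spec_komutativnost; infer_instance

-- ===== CLAIM (what is proved, stated in full; the proofs are below) =====
def Claim_equal_komutativnost : Prop := ∀ (m1 : List (List Int)) (m2 : List (List Int)), Dom_komutativnost m1 m2 → Pre_komutativnost m1 m2 → Spec_komutativnost m1 m2 (komutativnost m1 m2)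

-- ===== LEMMAS AND PROOFS =====

-- folding steps that each set index i from the current value of index i = one set of the folded value
theorem pv_foldl_set {α β : Type} (d : α) (l : List β) (F : List α → β → List α)
    (step : α → β → α) (i : Nat)
    (hF : ∀ (r : List α) (b : β), i < r.length → F r b = r.set i (step (r.getD i d) b)) :
    ∀ (r : List α), i < r.length → l.foldl F r = r.set i (l.foldl step (r.getD i d)) := by
  induction l with
  | nil =>
      intro r hi
      have h0 : r.getD i d = r[i] := by
        simp [List.getD_eq_getElem?_getD, List.getElem?_eq_getElem hi]
      simp only [List.foldl_nil, h0, List.set_getElem_self]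
  | cons b t ih =>
      intro r hi
      have h1 : F r b = r.set i (step (r.getD i d) b) := hF r b hi
      have hlen : i < (r.set i (step (r.getD i d) b)).length := by simpa using hi
      have h2 := ih (r.set i (step (r.getD i d) b)) hlen
      simp only [List.foldl_cons, h1, h2]
      rw [List.getD_eq_getElem _ d hlen, List.getElem_set_self, List.set_set]

-- filling fold: step c writes g c at index c (given the cell still holds z); folding over range c
-- over an all-z list fills a prefix
theorem pv_fill_fold {α : Type} (n : Nat) (z : α) (g : Nat → α) (F : List α → Nat → List α)
    (hF : ∀ (r : List α) (c : Nat), c < n → r.length = n → r.getD c z = z → F r c = r.set c (g c)) :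
    ∀ c ≤ n, (List.range c).foldl F (List.replicate n z)
      = (List.range c).map g ++ List.replicate (n - c) z := by
  intro c
  induction c with
  | zero => intro _; simp
  | succ c ih =>
      intro hc
      have hcn : c < n := hc
      have hprev := ih (Nat.le_of_lt hcn)
      rw [List.range_succ, List.foldl_append, List.foldl_cons, List.foldl_nil, hprev]
      have hlen : ((List.range c).map g ++ List.replicate (n - c) z).length = n := by
        simp; omega
      have hz : ((List.range c).map g ++ List.replicate (n - c) z).getD c z = z := by
        have h1 : c < ((List.range c).map g ++ List.replicate (n - c) z).length := by omega
        rw [List.getD_eq_getElem _ z h1]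
        rw [List.getElem_append_right (by simp)]
        simp
      rw [hF _ c hcn hlen hz]
      have hmaplen : ((List.range c).map g).length = c := by simp
      have hnc : n - c = (n - (c+1)) + 1 := by omega
      rw [List.set_append_right _ _ (by omega), hmaplen, Nat.sub_self, hnc,
        List.replicate_succ]
      simp

-- the inner j,k loops of mnozenje, at a fixed row i whose current content is all zeros,
-- write the dot-product row
theorem pv_inner_eq (A B : List (List Int)) (C : Nat) :
    ∀ (r : List (List Int)) (i : Nat), i < r.length → r.getD i [] = List.replicate C 0 →
    (List.range C).foldl (fun r j =>
        (List.range B.length).foldl (fun r k =>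
          pvBump r i j ((A.getD i []).getD k 0 * (B.getD k []).getD j 0)) r) r
    = r.set i ((List.range C).map (fun j =>
        (List.range B.length).foldl
          (fun s k => s + (A.getD i []).getD k 0 * (B.getD k []).getD j 0) 0)) := by
  intro r i hi hz
  -- step 1: each j-step only rewrites row i
  have hrow : ∀ (row : List Int) (j : Nat), j < row.length →
      (List.range B.length).foldl (fun row k => pvRowBump row j ((A.getD i []).getD k 0 * (B.getD k []).getD j 0)) row
      = row.set j ((List.range B.length).foldl
          (fun s k => s + (A.getD i []).getD k 0 * (B.getD k []).getD j 0) (row.getD j 0)) := by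
    intro row j hj
    exact pv_foldl_set 0 (List.range B.length)
      (fun row k => pvRowBump row j ((A.getD i []).getD k 0 * (B.getD k []).getD j 0))
      (fun s k => s + (A.getD i []).getD k 0 * (B.getD k []).getD j 0)
      j (fun row k hj' => rfl) row hj
  have hstep : ∀ (r : List (List Int)) (j : Nat), i < r.length →
      (List.range B.length).foldl (fun r k =>
          pvBump r i j ((A.getD i []).getD k 0 * (B.getD k []).getD j 0)) r
      = r.set i ((fun row j => (List.range B.length).foldl
          (fun row k => pvRowBump row j ((A.getD i []).getD k 0 * (B.getD k []).getD j 0)) row) (r.getD i []) j) := by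
    intro r j hir
    exact pv_foldl_set [] (List.range B.length)
      (fun r k => pvBump r i j ((A.getD i []).getD k 0 * (B.getD k []).getD j 0))
      (fun row k => pvRowBump row j ((A.getD i []).getD k 0 * (B.getD k []).getD j 0))
      i (fun r k hir' => rfl) r hir
  rw [pv_foldl_set [] (List.range C)
      (fun r j => (List.range B.length).foldl (fun r k =>
          pvBump r i j ((A.getD i []).getD k 0 * (B.getD k []).getD j 0)) r)
      (fun row j => (List.range B.length).foldl
          (fun row k => pvRowBump row j ((A.getD i []).getD k 0 * (B.getD k []).getD j 0)) row)
      i hstep r hi, hz]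
  congr 1
  -- step 2: fill the zero row
  have := pv_fill_fold C (0:Int)
      (fun j => (List.range B.length).foldl
          (fun s k => s + (A.getD i []).getD k 0 * (B.getD k []).getD j 0) 0)
      (fun row j => (List.range B.length).foldl
          (fun row k => pvRowBump row j ((A.getD i []).getD k 0 * (B.getD k []).getD j 0)) row)
      (by
        intro row c hc hlen hz0
        show List.foldl _ row (List.range B.length) = _
        rw [hrow row c (by omega), hz0])
      C (Nat.le_refl C)
  simpa using this

theorem pv_mnozenje_eq (A B : List (List Int)) (h : (A.headD []).length = B.length) :
    pvMnozenje A B = some ((List.range A.length).map (fun i =>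
      (List.range (B.headD []).length).map (fun j =>
        (List.range B.length).foldl
          (fun s k => s + (A.getD i []).getD k 0 * (B.getD k []).getD j 0) 0))) := by
  unfold pvMnozenje
  rw [if_neg (by omega)]
  congr 1
  have hinit : A.map (fun _ => (B.headD []).map (fun _ => (0:Int)))
      = List.replicate A.length (List.replicate (B.headD []).length (0:Int)) := by
    simp [List.map_const']
  rw [hinit]
  have hmain := pv_fill_fold A.length (List.replicate (B.headD []).length (0:Int))
    (fun i => (List.range (B.headD []).length).map (fun j =>
        (List.range B.length).foldl
          (fun s k => s + (A.getD i []).getD k 0 * (B.getD k []).getD j 0) 0))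
    (fun r i => (List.range (B.headD []).length).foldl (fun r j =>
        (List.range B.length).foldl (fun r k =>
          pvBump r i j ((A.getD i []).getD k 0 * (B.getD k []).getD j 0)) r) r)
    (by
      intro r c hc hlen hz
      have hc' : c < r.length := by omega
      rw [List.getD_eq_getElem?_getD, List.getElem?_eq_getElem hc'] at hz
      have hz' : r.getD c [] = List.replicate (B.headD []).length 0 := by
        rw [List.getD_eq_getElem?_getD, List.getElem?_eq_getElem hc']; exact hz
      exact pv_inner_eq A B (B.headD []).length r c hc' hz')
    A.length (Nat.le_refl A.length)
  simpa using hmain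

theorem pv_map_range_eq_iff {α : Type} (n : Nat) (f g : Nat → α) :
    (List.range n).map f = (List.range n).map g ↔ ∀ i < n, f i = g i := by
  constructor
  · intro h i hi
    have h2 : ((List.range n).map f)[i]? = ((List.range n).map g)[i]? := by rw [h]
    simp [hi] at h2
    exact h2
  · intro h
    apply List.ext_getElem (by simp)
    intro i h1 h2
    simp only [List.getElem_map, List.getElem_range]
    exact h i (by simpa using h1)

-- the two ports agree on every input (Pre_ is only needed to match the Python, which raises)
theorem pv_ports_eq (m1 m2 : List (List Int)) : komutativnost m1 m2 = komutativnost_alt m1 m2 := by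
  unfold komutativnost komutativnost_alt
  by_cases h1 : (m1.headD []).length = m2.length
  · by_cases h2 : (m2.headD []).length = m1.length
    · rw [pv_mnozenje_eq m1 m2 h1, pv_mnozenje_eq m2 m1 h2]
      by_cases h3 : m1.length = m2.length
      · rw [if_neg (by simp only [Bool.or_eq_true, bne_iff_ne]; tauto)]
        rw [Bool.eq_iff_iff]
        simp only [decide_eq_true_iff, List.all_eq_true, List.mem_range, beq_iff_eq, h1, h2, h3]
        rw [pv_map_range_eq_iff]
        constructor
        · intro h i hi j hj
          have := (pv_map_range_eq_iff _ _ _).mp (h i (by omega)) j (by omega)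
          simpa [h3] using this
        · intro h i hi
          rw [pv_map_range_eq_iff]
          intro j hj
          exact h i (by omega) j (by omega)
      · rw [if_pos (by simp only [Bool.or_eq_true, bne_iff_ne]; tauto)]
        refine decide_eq_false ?_
        intro hcontra
        have := congrArg List.length hcontra
        simp at this
        omega
    · rw [if_pos (by simp only [Bool.or_eq_true, bne_iff_ne]; tauto)]
      have hnone : pvMnozenje m2 m1 = none := by unfold pvMnozenje; rw [if_pos (by omega)]
      rw [hnone]
      cases pvMnozenje m1 m2 <;> rfl
  · rw [if_pos (by simp only [Bool.or_eq_true, bne_iff_ne]; tauto)]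
    have hnone : pvMnozenje m1 m2 = none := by unfold pvMnozenje; rw [if_pos (by omega)]
    rw [hnone]

-- ===== VERDICT (by name: the statement is the Claim_ definition above) =====
theorem komutativnost_spec : Claim_equal_komutativnost := by
  intro m1 m2 _ _
  exact pv_ports_eq m1 m2
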